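-- pv_equiv track=rewrite | github.com/jeffechiu/nba-hacks2019 | Basketball Analytics/lineups.py | getTeamPlayerIDS
-- ===== SOURCE A (Python) =====
-- def getTeamPlayerIDS(game, t1, t2):
-- 	tp1=""
-- 	tp2=""
-- 	for row in game:
-- 		if row['event_msg_type'] == '9' and (row['action_type'] == '1' or row['action_type'] == '2') and row['team_id'] == t1:
-- 			tp1 = row['person1']
-- 		if row['event_msg_type'] == '9' and (row['action_type'] == '1' or row['action_type'] == '2') and row['team_id'] == t2:
-- 			tp2 = row['person1']
-- 	return (tp1, tp2)
-- ===== SOURCE B (Python) =====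
-- def getTeamPlayerIDS(game, t1, t2):
--     # Scan from the end and stop as soon as both teams' last scorer is found.
--     tp1 = tp2 = None
--     for row in reversed(game):
--         if row['event_msg_type'] == '9' and row['action_type'] in ('1', '2'):
--             tid = row['team_id']
--             if tp1 is None and tid == t1:
--                 tp1 = row['person1']
--             if tp2 is None and tid == t2:
--                 tp2 = row['person1']
--             if tp1 is not None and tp2 is not None:
--                 break
--     return (tp1 if tp1 is not None else "", tp2 if tp2 is not None else "")
-- ===== Notes on version B (the rewrite author's own statement) =====
-- stated objective: alternative
-- what changed: B scans the game in reverse keeping None-sentinel slots and breaks as soon as both teams' last scorer is found, instead of A's forward scan that overwrites two accumulators on every match.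
import Mathlib
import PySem

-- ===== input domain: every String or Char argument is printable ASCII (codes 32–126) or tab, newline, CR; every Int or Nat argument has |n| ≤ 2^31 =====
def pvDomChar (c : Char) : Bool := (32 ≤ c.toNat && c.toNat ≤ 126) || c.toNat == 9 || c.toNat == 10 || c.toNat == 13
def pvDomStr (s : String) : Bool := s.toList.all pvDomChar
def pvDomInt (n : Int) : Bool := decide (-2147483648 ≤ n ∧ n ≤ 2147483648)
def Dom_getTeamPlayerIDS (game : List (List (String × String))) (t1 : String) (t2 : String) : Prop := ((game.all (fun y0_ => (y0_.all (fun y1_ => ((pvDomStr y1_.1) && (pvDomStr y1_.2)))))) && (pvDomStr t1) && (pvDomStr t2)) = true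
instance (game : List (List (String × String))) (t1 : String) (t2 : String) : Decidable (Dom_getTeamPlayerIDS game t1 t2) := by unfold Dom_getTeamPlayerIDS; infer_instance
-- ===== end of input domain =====

-- B scans the game backwards and stops as soon as both teams' last scorer is found
-- (alternative decomposition; same return value). No argument is mutated by either version.

-- dict lookup (first match in the association list); inside Pre_ every key accessed is present,
-- so the "" default of getD is never taken on admitted inputs
def pvGetD (row : List (String × String)) (k : String) : String := (List.lookup k row).getD ""

-- ===== PORT A =====
def getTeamPlayerIDS (game : List (List (String × String))) (t1 : String) (t2 : String) : String × String :=
  game.foldl (fun s row =>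
    let tp1 := if pvGetD row "event_msg_type" = "9" ∧ (pvGetD row "action_type" = "1" ∨ pvGetD row "action_type" = "2") ∧ pvGetD row "team_id" = t1 then pvGetD row "person1" else s.1
    let tp2 := if pvGetD row "event_msg_type" = "9" ∧ (pvGetD row "action_type" = "1" ∨ pvGetD row "action_type" = "2") ∧ pvGetD row "team_id" = t2 then pvGetD row "person1" else s.2
    (tp1, tp2)) ("", "")

-- ===== PORT B =====
def altLoop (t1 t2 : String) (tp1 tp2 : Option String) : List (List (String × String)) → Option String × Option String
  | [] => (tp1, tp2)
  | row :: rest =>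
    if pvGetD row "event_msg_type" = "9" ∧ (pvGetD row "action_type" = "1" ∨ pvGetD row "action_type" = "2") then
      let tid := pvGetD row "team_id"
      let tp1' := if tp1 = none ∧ tid = t1 then some (pvGetD row "person1") else tp1
      let tp2' := if tp2 = none ∧ tid = t2 then some (pvGetD row "person1") else tp2
      if tp1' ≠ none ∧ tp2' ≠ none then (tp1', tp2') else altLoop t1 t2 tp1' tp2' rest
    else altLoop t1 t2 tp1 tp2 rest

def getTeamPlayerIDS_alt (game : List (List (String × String))) (t1 : String) (t2 : String) : String × String :=
  let r := altLoop t1 t2 none none game.reverse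
  ((r.1).getD "", (r.2).getD "")

-- ===== PRECONDITION & SPEC =====
-- Pre_ excludes exactly the inputs on which the Python A raises KeyError: a row missing a key
-- at the moment A's short-circuiting conditions would read it.
def Pre_getTeamPlayerIDS (game : List (List (String × String))) (t1 : String) (t2 : String) : Prop :=
  ∀ row ∈ game,
    (List.lookup "event_msg_type" row).isSome = true ∧
    (pvGetD row "event_msg_type" = "9" →
      (List.lookup "action_type" row).isSome = true ∧
      ((pvGetD row "action_type" = "1" ∨ pvGetD row "action_type" = "2") →
        (List.lookup "team_id" row).isSome = true ∧
        ((pvGetD row "team_id" = t1 ∨ pvGetD row "team_id" = t2) →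
          (List.lookup "person1" row).isSome = true)))
instance (game : List (List (String × String))) (t1 : String) (t2 : String) : Decidable (Pre_getTeamPlayerIDS game t1 t2) := by unfold Pre_getTeamPlayerIDS; infer_instance

def pvWitness_getTeamPlayerIDS : (List (List (String × String))) × String × String :=
  ([ [("event_msg_type", "9"), ("action_type", "1"), ("team_id", "A"), ("person1", "p7")],
     [("event_msg_type", "9"), ("action_type", "2"), ("team_id", "B"), ("person1", "p3")] ], "A", "B")

def Spec_getTeamPlayerIDS (game : List (List (String × String))) (t1 : String) (t2 : String) (out : String × String) : Prop := out = getTeamPlayerIDS_alt game t1 t2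
instance (game : List (List (String × String))) (t1 : String) (t2 : String) (out : String × String) : Decidable (Spec_getTeamPlayerIDS game t1 t2 out) := by unfold Spec_getTeamPlayerIDS; infer_instance

-- ===== CLAIM (what is proved, stated in full; the proofs are below) =====
def Claim_equal_getTeamPlayerIDS : Prop := ∀ (game : List (List (String × String))) (t1 : String) (t2 : String), Dom_getTeamPlayerIDS game t1 t2 → Pre_getTeamPlayerIDS game t1 t2 → Spec_getTeamPlayerIDS game t1 t2 (getTeamPlayerIDS game t1 t2)

-- ===== LEMMAS AND PROOFS =====

-- the "last scoring row of team `team`" selector both loops are computing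
def pvHit (team : String) (row : List (String × String)) : Option String :=
  if pvGetD row "event_msg_type" = "9" ∧ (pvGetD row "action_type" = "1" ∨ pvGetD row "action_type" = "2") ∧ pvGetD row "team_id" = team then some (pvGetD row "person1") else none

lemma findSome?_cons_or {α β : Type} (f : α → Option β) (a : α) (l : List α) :
    List.findSome? f (a :: l) = (f a).or (l.findSome? f) := by
  cases h : f a <;> simp [h, Option.or]

lemma foldlA_eq (game : List (List (String × String))) (t1 t2 : String) :
    ∀ s : String × String,
      game.foldl (fun s row =>
        let tp1 := if pvGetD row "event_msg_type" = "9" ∧ (pvGetD row "action_type" = "1" ∨ pvGetD row "action_type" = "2") ∧ pvGetD row "team_id" = t1 then pvGetD row "person1" else s.1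
        let tp2 := if pvGetD row "event_msg_type" = "9" ∧ (pvGetD row "action_type" = "1" ∨ pvGetD row "action_type" = "2") ∧ pvGetD row "team_id" = t2 then pvGetD row "person1" else s.2
        (tp1, tp2)) s
      = ((game.reverse.findSome? (pvHit t1)).getD s.1,
         (game.reverse.findSome? (pvHit t2)).getD s.2) := by
  induction game with
  | nil => intro s; simp
  | cons row rest ih =>
      intro s
      rw [List.foldl_cons, ih, List.reverse_cons, List.findSome?_append,
        List.findSome?_append, Option.getD_or, Option.getD_or]
      congr 1
      · simp only [List.findSome?, pvHit]
        split_ifs with h <;> simp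
      · simp only [List.findSome?, pvHit]
        split_ifs with h <;> simp

lemma altLoop_eq (t1 t2 : String) :
    ∀ (l : List (List (String × String))) (tp1 tp2 : Option String),
      altLoop t1 t2 tp1 tp2 l = (tp1.or (l.findSome? (pvHit t1)), tp2.or (l.findSome? (pvHit t2))) := by
  intro l
  induction l with
  | nil => intro tp1 tp2; simp [altLoop]
  | cons row rest ih =>
      intro tp1 tp2
      rw [findSome?_cons_or, findSome?_cons_or, ← Option.or_assoc, ← Option.or_assoc]
      by_cases hc : pvGetD row "event_msg_type" = "9" ∧ (pvGetD row "action_type" = "1" ∨ pvGetD row "action_type" = "2")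
      · have h1 : (if tp1 = none ∧ pvGetD row "team_id" = t1 then some (pvGetD row "person1") else tp1)
            = tp1.or (pvHit t1 row) := by
          cases tp1 <;> simp [pvHit, hc, Option.or]
        have h2 : (if tp2 = none ∧ pvGetD row "team_id" = t2 then some (pvGetD row "person1") else tp2)
            = tp2.or (pvHit t2 row) := by
          cases tp2 <;> simp [pvHit, hc, Option.or]
        rw [altLoop, if_pos hc]
        simp only [h1, h2]
        by_cases hstop : tp1.or (pvHit t1 row) ≠ none ∧ tp2.or (pvHit t2 row) ≠ none
        · rw [if_pos hstop]
          obtain ⟨hs1, hs2⟩ := hstop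
          cases e1 : tp1.or (pvHit t1 row) <;> cases e2 : tp2.or (pvHit t2 row) <;> simp_all [Option.or]
        · rw [if_neg hstop, ih]
      · have h1 : pvHit t1 row = none := by simp [pvHit]; tauto
        have h2 : pvHit t2 row = none := by simp [pvHit]; tauto
        rw [altLoop, if_neg hc, ih, h1, h2]
        simp

-- ===== VERDICT (by name: the statement is the Claim_ definition above) =====
theorem getTeamPlayerIDS_spec : Claim_equal_getTeamPlayerIDS := by
  intro game t1 t2 _ _
  unfold Spec_getTeamPlayerIDS getTeamPlayerIDS getTeamPlayerIDS_alt
  rw [foldlA_eq, altLoop_eq]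
  simp
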